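-- pv_equiv track=rewrite | github.com/wjoell/cascade-rest-cli | migration/analyze_external_links.py | find_repeated_urls
-- ===== SOURCE A (Python) =====
-- from collections import defaultdict
-- from typing import Dict, List, Tuple
--
-- def find_repeated_urls(links: List[Dict[str, str]], min_count: int = 5) -> List[Tuple[str, int, List[str]]]:
--     """
--     Find URLs that appear multiple times.
--
--     Returns:
--         List of (url, count, list of pages using it)
--     """
--     url_usage = defaultdict(lambda: {'count': 0, 'pages': set()})
--
--     for link in links:
--         url = link['url']
--         page = link['cms_asset_path']
--         url_usage[url]['count'] += 1
--         url_usage[url]['pages'].add(page)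
--
--     # Filter and sort
--     repeated = [
--         (url, data['count'], sorted(list(data['pages'])))
--         for url, data in url_usage.items()
--         if data['count'] >= min_count
--     ]
--
--     repeated.sort(key=lambda x: x[1], reverse=True)
--     return repeated
-- ===== SOURCE B (Python) =====
-- from typing import Dict, List, Tuple
--
-- def find_repeated_urls(links: List[Dict[str, str]], min_count: int = 5) -> List[Tuple[str, int, List[str]]]:
--     """
--     Find URLs that appear multiple times.
--
--     Returns:
--         List of (url, count, list of pages using it)
--     """
--     # flatten once, then handle each distinct url (first-seen order) by scanning the pair list
--     pairs = [(link['url'], link['cms_asset_path']) for link in links]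
--     repeated = []
--     for url in dict.fromkeys(u for u, _ in pairs):
--         pages = [p for u, p in pairs if u == url]
--         if len(pages) >= min_count:
--             repeated.append((url, len(pages), sorted(set(pages))))
--     repeated.sort(key=lambda x: x[1], reverse=True)
--     return repeated
-- ===== Notes on version B (the rewrite author's own statement) =====
-- stated objective: simpler
-- what changed: B drops A's incrementally maintained per-url count/page-set dict entirely: it flattens links to a (url, page) pair list once and then, for each distinct url in first-seen order, derives count and pages by filtering that pair list, before the same stable descending sort by count.
import Mathlib
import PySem

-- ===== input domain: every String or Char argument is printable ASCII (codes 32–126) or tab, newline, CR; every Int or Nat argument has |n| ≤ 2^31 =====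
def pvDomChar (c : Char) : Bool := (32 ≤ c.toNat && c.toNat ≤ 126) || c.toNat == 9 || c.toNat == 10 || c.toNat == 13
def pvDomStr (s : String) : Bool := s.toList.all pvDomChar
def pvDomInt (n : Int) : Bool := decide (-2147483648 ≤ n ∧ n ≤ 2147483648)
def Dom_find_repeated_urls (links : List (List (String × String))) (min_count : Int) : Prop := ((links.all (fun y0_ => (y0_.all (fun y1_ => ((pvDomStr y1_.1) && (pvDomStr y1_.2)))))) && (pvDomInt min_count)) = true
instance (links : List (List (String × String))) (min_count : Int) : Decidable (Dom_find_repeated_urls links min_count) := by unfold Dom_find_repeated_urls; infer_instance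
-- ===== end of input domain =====

-- B drops A's incrementally maintained per-url count/page-set dict: it flattens links to a
-- (url, page) pair list once and, for each distinct url in first-seen order, derives count and
-- pages by filtering that list, before the same stable descending sort; objective: simpler.

-- ===== PORT A =====
def find_repeated_urls (links : List (List (String × String))) (min_count : Int) :
    List (String × Int × List String) :=
  let url_usage : PySem.Dict String (Int × PySem.Set String) :=
    links.foldl (fun d link =>
      let url := ((PySem.Dict.mk link).get? "url").getD ""
      let page := ((PySem.Dict.mk link).get? "cms_asset_path").getD ""
      -- url_usage[url]['count'] += 1 ; url_usage[url]['pages'].add(page)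
      d.modify url (0, PySem.Set.empty) (fun v => (v.1 + 1, PySem.Set.add v.2 page)))
      PySem.Dict.empty
  let repeated : List (String × Int × List String) :=
    (url_usage.items.filter (fun p => decide (min_count ≤ p.2.1))).map
      (fun p => (p.1, (p.2.1, PySem.List.sorted p.2.2 (fun x => x) false)))
  PySem.List.sorted repeated (fun x => x.2.1) true

-- ===== PORT B =====
def find_repeated_urls_alt (links : List (List (String × String))) (min_count : Int) :
    List (String × Int × List String) :=
  let pairs : List (String × String) :=
    links.map (fun link =>
      (((PySem.Dict.mk link).get? "url").getD "",
       ((PySem.Dict.mk link).get? "cms_asset_path").getD ""))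
  let repeated : List (String × Int × List String) :=
    (PySem.List.dedup (pairs.map Prod.fst)).foldl (fun acc url =>
      let pages := (pairs.filter (fun q => q.1 == url)).map Prod.snd
      if decide (min_count ≤ (pages.length : Int)) then
        acc ++ [(url, ((pages.length : Int), PySem.List.sorted (PySem.Set.ofList pages) (fun x => x) false))]
      else acc) []
  PySem.List.sorted repeated (fun x => x.2.1) true

-- ===== PRECONDITION & SPEC =====
-- Pre_ excludes exactly the inputs with a link dict missing key 'url' or 'cms_asset_path',
-- on which the Python A raises KeyError (B raises there too).
def Pre_find_repeated_urls (links : List (List (String × String))) (min_count : Int) : Prop :=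
  ∀ link ∈ links, ((PySem.Dict.mk link).get? "url").isSome = true ∧
    ((PySem.Dict.mk link).get? "cms_asset_path").isSome = true
instance (links : List (List (String × String))) (min_count : Int) : Decidable (Pre_find_repeated_urls links min_count) := by unfold Pre_find_repeated_urls; infer_instance

def pvWitness_find_repeated_urls : (List (List (String × String))) × Int :=
  ([[("url", "u"), ("cms_asset_path", "p")], [("url", "u"), ("cms_asset_path", "q")]], 2)

def Spec_find_repeated_urls (links : List (List (String × String))) (min_count : Int) (out : List (String × Int × List String)) : Prop := out = find_repeated_urls_alt links min_count
instance (links : List (List (String × String))) (min_count : Int) (out : List (String × Int × List String)) : Decidable (Spec_find_repeated_urls links min_count out) := by unfold Spec_find_repeated_urls; infer_instance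

-- ===== CLAIM (what is proved, stated in full; the proofs are below) =====
def Claim_equal_find_repeated_urls : Prop := ∀ (links : List (List (String × String))) (min_count : Int), Dom_find_repeated_urls links min_count → Pre_find_repeated_urls links min_count → Spec_find_repeated_urls links min_count (find_repeated_urls links min_count)

-- ===== LEMMAS AND PROOFS =====

-- proof-only abbreviations
def pvUrl (link : List (String × String)) : String := ((PySem.Dict.mk link).get? "url").getD ""
def pvPage (link : List (String × String)) : String := ((PySem.Dict.mk link).get? "cms_asset_path").getD ""
def pvPairs (links : List (List (String × String))) : List (String × String) :=
  links.map (fun link => (pvUrl link, pvPage link))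
def pvF2 (v : List String) : Int × PySem.Set String := ((v.length : Int), PySem.Set.ofList v)
def pvFp (p : String × List String) : String × (Int × PySem.Set String) := (p.1, pvF2 p.2)
def pvMapD (d : PySem.Dict String (List String)) : PySem.Dict String (Int × PySem.Set String) :=
  PySem.Dict.mk (d.items.map pvFp)
def pvStepA (d : PySem.Dict String (Int × PySem.Set String)) (link : List (String × String)) :
    PySem.Dict String (Int × PySem.Set String) :=
  d.modify (pvUrl link) (0, PySem.Set.empty) (fun v => (v.1 + 1, PySem.Set.add v.2 (pvPage link)))
def pvStepP (d : PySem.Dict String (List String)) (p : String × String) :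
    PySem.Dict String (List String) :=
  d.modify p.1 [] (fun ps => ps ++ [p.2])

-- the pages-per-url group of one url, read off the flat pair list
def pvPages (pairs : List (String × String)) (u : String) : List String :=
  (pairs.filter (fun q => q.1 == u)).map Prod.snd

-- the common intermediate list of result triples, in first-seen url order
def pvRep (links : List (List (String × String))) (min_count : Int) : List (String × Int × List String) :=
  ((PySem.Set.ofList ((pvPairs links).map Prod.fst)).filter
      (fun u => decide (min_count ≤ ((pvPages (pvPairs links) u).length : Int)))).map
    (fun u => (u, (((pvPages (pvPairs links) u).length : Int),
        PySem.List.sorted (PySem.Set.ofList (pvPages (pvPairs links) u)) (fun x => x) false)))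

-- ---- A's dict is the (length, set-of) image of the pages dict ----
lemma pv_get?_mapD (l : List (String × List String)) (k : String) :
    (PySem.Dict.mk (l.map pvFp)).get? k = ((PySem.Dict.mk l).get? k).map pvF2 := by
  induction l with
  | nil => rfl
  | cons p l ih =>
    obtain ⟨pk, pv⟩ := p
    simp only [List.map_cons, pvFp, PySem.Dict.get?_mk_cons]
    by_cases h : pk == k <;> simp [h, ih]

lemma pv_keys_mapD (d : PySem.Dict String (List String)) : (pvMapD d).keys = d.keys := by
  show (PySem.Dict.mk (d.items.map pvFp)).items.map Prod.fst = d.items.map Prod.fst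
  simp [List.map_map]
  intro a b _
  rfl

lemma pv_contains_mapD (d : PySem.Dict String (List String)) (k : String) :
    (pvMapD d).contains k = d.contains k := by
  rw [PySem.Dict.contains_eq_decide_mem_keys, PySem.Dict.contains_eq_decide_mem_keys, pv_keys_mapD]

lemma pv_insert_mapD (d : PySem.Dict String (List String)) (k : String) (v : List String) :
    pvMapD (d.insert k v) = (pvMapD d).insert k (pvF2 v) := by
  apply PySem.Dict.ext
  show ((d.insert k v).items.map pvFp) = ((pvMapD d).insert k (pvF2 v)).items
  rw [PySem.Dict.items_insert, PySem.Dict.items_insert, pv_contains_mapD]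
  by_cases h : d.contains k
  · simp only [h, if_true]
    show _ = List.map _ (d.items.map pvFp)
    rw [List.map_map, List.map_map]
    apply List.map_congr_left
    intro p _
    by_cases hp : p.1 = k <;> simp [pvFp, hp]
  · simp only [h]
    show (d.items ++ [(k, v)]).map pvFp = (d.items.map pvFp) ++ [(k, pvF2 v)]
    simp [pvFp]

lemma pv_getD_mapD (d : PySem.Dict String (List String)) (k : String) :
    (pvMapD d).getD k (0, PySem.Set.empty) = pvF2 (d.getD k []) := by
  rw [PySem.Dict.getD_eq_get?_getD, PySem.Dict.getD_eq_get?_getD,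
      show (pvMapD d).get? k = (d.get? k).map pvF2 from pv_get?_mapD d.items k]
  cases d.get? k <;> rfl

lemma pv_step_mapD (d : PySem.Dict String (List String)) (link : List (String × String)) :
    pvStepA (pvMapD d) link = pvMapD (pvStepP d (pvUrl link, pvPage link)) := by
  show (pvMapD d).insert (pvUrl link)
      (((pvMapD d).getD (pvUrl link) (0, PySem.Set.empty)).1 + 1,
        PySem.Set.add ((pvMapD d).getD (pvUrl link) (0, PySem.Set.empty)).2 (pvPage link))
    = pvMapD (d.insert (pvUrl link) (d.getD (pvUrl link) [] ++ [pvPage link]))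
  rw [pv_insert_mapD, pv_getD_mapD]
  congr 1
  show (((d.getD (pvUrl link) []).length : Int) + 1,
      PySem.Set.add (PySem.Set.ofList (d.getD (pvUrl link) [])) (pvPage link))
    = pvF2 (d.getD (pvUrl link) [] ++ [pvPage link])
  unfold pvF2
  refine Prod.ext ?_ ?_
  · simp
  · simp [PySem.Set.ofList_eq_foldl, List.foldl_append]

lemma pv_fold_mapD : ∀ (links : List (List (String × String))) (d : PySem.Dict String (List String)),
    links.foldl pvStepA (pvMapD d) = pvMapD ((pvPairs links).foldl pvStepP d) := by
  intro links
  induction links with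
  | nil => intro d; rfl
  | cons l ls ih => intro d; simp only [List.foldl_cons, pvPairs, List.map_cons, pv_step_mapD, ih]

-- ---- the pages dict, characterised entry by entry ----
lemma pv_pagesDict_keys (pairs : List (String × String)) :
    (pairs.foldl pvStepP PySem.Dict.empty).keys = PySem.Set.ofList (pairs.map Prod.fst) := by
  have h := PySem.Dict.keys_foldl_modify_key (l := pairs) (key := Prod.fst)
      (d0 := ([] : List String)) (f := fun _ p => (fun ps => ps ++ [p.2]))
      (d := PySem.Dict.empty)
  simpa [pvStepP, PySem.Dict.keys_empty, PySem.Set.update, PySem.Set.ofList_eq_foldl] using h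

lemma pv_pagesDict_nodup (pairs : List (String × String)) :
    (pairs.foldl pvStepP PySem.Dict.empty).keys.Nodup := by
  have h := PySem.Dict.nodup_keys_foldl_modify_key (l := pairs) (key := Prod.fst)
      (d0 := ([] : List String)) (f := fun _ p => (fun ps => ps ++ [p.2]))
      (d := PySem.Dict.empty) (PySem.Dict.nodup_keys_empty)
  simpa [pvStepP] using h

lemma pv_pagesDict_getD (pairs : List (String × String)) (u : String) :
    (pairs.foldl pvStepP PySem.Dict.empty).getD u [] = pvPages pairs u := by
  have h := PySem.Dict.getD_foldl_modify_append (l := pairs) (d := PySem.Dict.empty) (c := u)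
  simpa [pvStepP, pvPages, PySem.Dict.getD_empty] using h

lemma pv_pagesDict_items (pairs : List (String × String)) :
    (pairs.foldl pvStepP PySem.Dict.empty).items
      = (PySem.Set.ofList (pairs.map Prod.fst)).map (fun u => (u, pvPages pairs u)) := by
  rw [PySem.Dict.items_eq_map_keys _ (pv_pagesDict_nodup pairs) []]
  rw [pv_pagesDict_keys]
  exact List.map_congr_left (fun u _ => by rw [pv_pagesDict_getD])

-- ---- the two ports, rewritten over pvRep ----
lemma pv_portA_eq (links : List (List (String × String))) (min_count : Int) :
    find_repeated_urls links min_count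
      = PySem.List.sorted (pvRep links min_count) (fun x => x.2.1) true := by
  show PySem.List.sorted
      (((links.foldl pvStepA PySem.Dict.empty).items.filter (fun p => decide (min_count ≤ p.2.1))).map
        (fun p => (p.1, (p.2.1, PySem.List.sorted p.2.2 (fun x => x) false))))
      (fun x => x.2.1) true = _
  rw [show links.foldl pvStepA PySem.Dict.empty = pvMapD ((pvPairs links).foldl pvStepP PySem.Dict.empty) from
        pv_fold_mapD links PySem.Dict.empty]
  congr 1
  show ((((pvPairs links).foldl pvStepP PySem.Dict.empty).items.map pvFp).filter
      (fun p => decide (min_count ≤ p.2.1))).map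
      (fun p => (p.1, (p.2.1, PySem.List.sorted p.2.2 (fun x => x) false))) = pvRep links min_count
  rw [pv_pagesDict_items, List.map_map, List.filter_map, List.map_map]
  unfold pvRep
  congr 1

lemma pv_portB_eq (links : List (List (String × String))) (min_count : Int) :
    find_repeated_urls_alt links min_count
      = PySem.List.sorted (pvRep links min_count) (fun x => x.2.1) true := by
  show PySem.List.sorted
      ((PySem.List.dedup ((pvPairs links).map Prod.fst)).foldl (fun acc url =>
        let pages := ((pvPairs links).filter (fun q => q.1 == url)).map Prod.snd
        if decide (min_count ≤ (pages.length : Int)) then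
          acc ++ [(url, ((pages.length : Int), PySem.List.sorted (PySem.Set.ofList pages) (fun x => x) false))]
        else acc) [])
      (fun x => x.2.1) true = _
  congr 1
  rw [PySem.List.dedup_eq_ofList]
  rw [PySem.List.foldl_append_if]
  unfold pvRep pvPages
  congr 1

-- ===== VERDICT (by name: the statement is the Claim_ definition above) =====
theorem find_repeated_urls_spec : Claim_equal_find_repeated_urls := by
  intro links min_count _ _
  unfold Spec_find_repeated_urls
  rw [pv_portA_eq, pv_portB_eq]
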